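-- pv_equiv track=rewrite | github.com/Willcox-Research-Group/rom-operator-inference-Python3 | src/opinf/lstsq/_base.py | lstsq_size
-- ===== SOURCE A (Python) =====
-- def lstsq_size(modelform, r, m=0, affines=None) -> int:
--     r"""Compute the number of columns in the operator matrix :math:`\Ohat` in
--     the Operator Inference least-squares problem. This is also the number of
--     columns in the data matrix :math:`\D`.
--
--     Parameters
--     ----------
--     modelform : str containing 'c', 'A', 'H', 'G', and/or 'B'
--         The structure of the desired reduced-order model. Each character
--         indicates the presence of a different term in the model:
--         'c' : Constant term c
--         'A' : Linear state term Ax.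
--         'H' : Quadratic state term H(x⊗x).
--         'G' : Cubic state term G(x⊗x⊗x).
--         'B' : Input term Bu.
--         For example, modelform=="AB" means f(x,u) = Ax + Bu.
--     r : int
--         The dimension of the reduced order model.
--     m : int
--         The dimension of the inputs of the model.
--         Must be zero unless 'B' is in `modelform`.
--     affines : dict(str -> list(callables))
--         Functions that define the structures of the affine operators.
--         Keys must match the modelform:
--         * 'c': Constant term c(µ).
--         * 'A': Linear state matrix A(µ).
--         * 'H': Quadratic state matrix H(µ).
--         * 'G': Cubic state matrix G(µ).
--         * 'B': linear Input matrix B(µ).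
--         For example, if the constant term has the affine structure
--         c(µ) = θ1(µ)c1 + θ2(µ)c2 + θ3(µ)c3, then 'c' -> [θ1, θ2, θ3].
--
--     Returns
--     -------
--     ncols : int
--         The number of columns in the Operator Inference least-squares problem.
--     """
--     if "B" in modelform and m == 0:
--         raise ValueError("argument m > 0 required since 'B' in modelform")
--     if "B" not in modelform and m != 0:
--         raise ValueError(f"argument m={m} invalid since 'B' in modelform")
--
--     if affines is None:
--         affines = {}
--
--     qs = [
--         (
--             len(affines[op])
--             if (op in affines and op in modelform)
--             else 1 if op in modelform else 0
--         )
--         for op in "cAHGB"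
--     ]
--     rs = [1, r, r * (r + 1) // 2, r * (r + 1) * (r + 2) // 6, m]
--
--     return sum(qq * rr for qq, rr in zip(qs, rs))
-- ===== SOURCE B (Python) =====
-- def lstsq_size(modelform, r, m=0, affines=None) -> int:
--     if "B" in modelform and m == 0:
--         raise ValueError("argument m > 0 required since 'B' in modelform")
--     if "B" not in modelform and m != 0:
--         raise ValueError(f"argument m={m} invalid since 'B' in modelform")
--
--     if affines is None:
--         affines = {}
--
--     sizes = {
--         "c": 1,
--         "A": r,
--         "H": r * (r + 1) // 2,
--         "G": r * (r + 1) * (r + 2) // 6,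
--         "B": m,
--     }
--
--     ncols = 0
--     for op in dict.fromkeys(modelform):
--         if op in sizes:
--             ncols += (len(affines[op]) if op in affines else 1) * sizes[op]
--     return ncols
-- ===== Notes on version B (the rewrite author's own statement) =====
-- stated objective: alternative
-- what changed: B replaces A's two parallel length-5 lists (0/1/len multipliers zipped with term sizes) by a single accumulator loop over the distinct characters of modelform with a size lookup table, so absent operators contribute nothing instead of a zero term.
import Mathlib
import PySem

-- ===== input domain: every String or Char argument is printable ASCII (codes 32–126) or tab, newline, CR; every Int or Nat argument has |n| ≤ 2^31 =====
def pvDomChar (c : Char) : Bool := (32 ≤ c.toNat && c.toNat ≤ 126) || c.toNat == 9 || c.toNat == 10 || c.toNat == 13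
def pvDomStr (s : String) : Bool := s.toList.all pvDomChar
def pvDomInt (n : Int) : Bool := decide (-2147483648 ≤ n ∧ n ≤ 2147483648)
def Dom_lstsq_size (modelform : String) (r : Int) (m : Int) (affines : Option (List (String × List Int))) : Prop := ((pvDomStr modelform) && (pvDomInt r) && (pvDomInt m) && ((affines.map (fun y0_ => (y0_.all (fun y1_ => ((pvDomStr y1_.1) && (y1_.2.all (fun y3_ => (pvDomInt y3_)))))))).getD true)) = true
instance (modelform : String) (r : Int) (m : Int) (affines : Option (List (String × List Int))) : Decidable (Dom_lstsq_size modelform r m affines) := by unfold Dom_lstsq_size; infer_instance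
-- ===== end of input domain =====

-- B replaces A's two parallel length-5 lists zipped together by one accumulator
-- loop over the distinct characters of modelform with a size lookup table
-- (objective: alternative decomposition, not faster).

-- ===== PORT A =====
def lstsq_size (modelform : String) (r : Int) (m : Int) (affines : Option (List (String × List Int))) : Int :=
  let d : PySem.Dict String (List Int) := PySem.Dict.mk (affines.getD [])
  let qs : List Int := (["c", "A", "H", "G", "B"].map (fun op =>
    if (PySem.Dict.contains d op && PySem.Str.isIn op modelform) then
      ((PySem.Dict.getD d op []).length : Int)
    else if PySem.Str.isIn op modelform then 1 else 0))
  let rs : List Int := [1, r, PySem.Int.floordiv (r * (r + 1)) 2,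
                        PySem.Int.floordiv (r * (r + 1) * (r + 2)) 6, m]
  ((qs.zip rs).map (fun p => p.1 * p.2)).sum

-- ===== PORT B =====
def lstsq_size_alt (modelform : String) (r : Int) (m : Int) (affines : Option (List (String × List Int))) : Int :=
  let d : PySem.Dict String (List Int) := PySem.Dict.mk (affines.getD [])
  let sizes : PySem.Dict Char Int := PySem.Dict.mk
    [('c', 1), ('A', r), ('H', PySem.Int.floordiv (r * (r + 1)) 2),
     ('G', PySem.Int.floordiv (r * (r + 1) * (r + 2)) 6), ('B', m)]
  (PySem.List.dedup modelform.toList).foldl (fun ncols ch =>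
    match PySem.Dict.get? sizes ch with
    | some sz =>
        ncols + (match PySem.Dict.get? d (String.ofList [ch]) with
                 | some fs => (fs.length : Int)
                 | none => 1) * sz
    | none => ncols) 0

-- ===== PRECONDITION & SPEC =====
-- Pre_ excludes exactly the inputs on which A raises ValueError:
-- 'B' in modelform with m == 0, or 'B' not in modelform with m != 0.
def Pre_lstsq_size (modelform : String) (r : Int) (m : Int) (affines : Option (List (String × List Int))) : Prop :=
  if PySem.Str.isIn "B" modelform then m ≠ 0 else m = 0

instance (modelform : String) (r : Int) (m : Int) (affines : Option (List (String × List Int))) : Decidable (Pre_lstsq_size modelform r m affines) := by unfold Pre_lstsq_size; infer_instance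

def pvWitness_lstsq_size : String × Int × Int × (Option (List (String × List Int))) :=
  ("cA", 2, 0, some [("A", [3, 4])])

def Spec_lstsq_size (modelform : String) (r : Int) (m : Int) (affines : Option (List (String × List Int))) (out : Int) : Prop := out = lstsq_size_alt modelform r m affines
instance (modelform : String) (r : Int) (m : Int) (affines : Option (List (String × List Int))) (out : Int) : Decidable (Spec_lstsq_size modelform r m affines out) := by unfold Spec_lstsq_size; infer_instance

-- ===== CLAIM (what is proved, stated in full; the proofs are below) =====
def Claim_equal_lstsq_size : Prop := ∀ (modelform : String) (r : Int) (m : Int) (affines : Option (List (String × List Int))), Dom_lstsq_size modelform r m affines → Pre_lstsq_size modelform r m affines → Spec_lstsq_size modelform r m affines (lstsq_size modelform r m affines)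

-- ===== LEMMAS AND PROOFS =====

-- the per-character contribution B's loop adds
def pvContrib (d : PySem.Dict String (List Int)) (sizes : PySem.Dict Char Int) (ch : Char) : Int :=
  match PySem.Dict.get? sizes ch with
  | some sz =>
      (match PySem.Dict.get? d (String.ofList [ch]) with
       | some fs => (fs.length : Int)
       | none => 1) * sz
  | none => 0

lemma sum_map_filter_eq (g : Char → Int) (p : Char → Bool) (l : List Char) :
    ((l.filter p).map g).sum = (l.map (fun x => if p x then g x else 0)).sum := by
  induction l with
  | nil => simp
  | cons a t ih =>
      by_cases h : p a <;> simp [h, ih]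

-- B's fold equals the sum of contributions over the distinct characters
lemma alt_eq_sum (modelform : String) (r : Int) (m : Int) (affines : Option (List (String × List Int))) :
    lstsq_size_alt modelform r m affines =
      ((PySem.List.dedup modelform.toList).map
        (pvContrib (PySem.Dict.mk (affines.getD []))
          (PySem.Dict.mk [('c', 1), ('A', r), ('H', PySem.Int.floordiv (r * (r + 1)) 2),
            ('G', PySem.Int.floordiv (r * (r + 1) * (r + 2)) 6), ('B', m)]))).sum := by
  simp only [lstsq_size_alt]
  have hstep : (fun (ncols : Int) (ch : Char) =>
      match PySem.Dict.get? (PySem.Dict.mk [('c', (1:Int)), ('A', r), ('H', PySem.Int.floordiv (r * (r + 1)) 2),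
            ('G', PySem.Int.floordiv (r * (r + 1) * (r + 2)) 6), ('B', m)]) ch with
      | some sz =>
          ncols + (match PySem.Dict.get? (PySem.Dict.mk (affines.getD [])) (String.ofList [ch]) with
                   | some fs => (fs.length : Int)
                   | none => 1) * sz
      | none => ncols) =
      (fun (ncols : Int) (ch : Char) => ncols +
        pvContrib (PySem.Dict.mk (affines.getD []))
          (PySem.Dict.mk [('c', 1), ('A', r), ('H', PySem.Int.floordiv (r * (r + 1)) 2),
            ('G', PySem.Int.floordiv (r * (r + 1) * (r + 2)) 6), ('B', m)]) ch) := by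
    funext ncols ch
    unfold pvContrib
    cases PySem.Dict.get? (PySem.Dict.mk [('c', (1:Int)), ('A', r), ('H', PySem.Int.floordiv (r * (r + 1)) 2),
            ('G', PySem.Int.floordiv (r * (r + 1) * (r + 2)) 6), ('B', m)]) ch with
    | none => simp
    | some sz => rfl
  rw [hstep, PySem.List.foldl_add]
  simp

theorem lstsq_size_equal (modelform : String) (r : Int) (m : Int) (affines : Option (List (String × List Int))) :
    lstsq_size modelform r m affines = lstsq_size_alt modelform r m affines := by
  set d : PySem.Dict String (List Int) := PySem.Dict.mk (affines.getD []) with hd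
  set sizes : PySem.Dict Char Int := PySem.Dict.mk
    [('c', 1), ('A', r), ('H', PySem.Int.floordiv (r * (r + 1)) 2),
     ('G', PySem.Int.floordiv (r * (r + 1) * (r + 2)) 6), ('B', m)] with hsz
  set L := modelform.toList with hL
  set g := pvContrib d sizes with hg
  -- g vanishes outside the five op characters
  have hzero : ∀ ch, ch ∉ (['c', 'A', 'H', 'G', 'B'] : List Char) → g ch = 0 := by
    intro ch hch
    simp only [List.mem_cons, List.not_mem_nil, or_false, not_or] at hch
    obtain ⟨h1, h2, h3, h4, h5⟩ := hch
    simp [hg, pvContrib, hsz, PySem.Dict.get?,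
      Ne.symm h1, Ne.symm h2, Ne.symm h3, Ne.symm h4, Ne.symm h5]
  -- '<c>' in modelform  ↔  the character is in modelform's character list
  have hmem : ∀ c : Char, PySem.Str.isIn (String.ofList [c]) modelform = decide (c ∈ L) := by
    intro c
    rw [Bool.eq_iff_iff, PySem.Str.isIn_iff_infix]
    simp [List.singleton_infix_iff, hL]
  -- B as a sum over the five op characters filtered by membership in modelform
  have hB : lstsq_size_alt modelform r m affines =
      (((['c', 'A', 'H', 'G', 'B'] : List Char).filter (fun ch => decide (ch ∈ L))).map g).sum := by
    rw [alt_eq_sum, ← hd, ← hsz, ← hg, ← hL]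
    have h1 : (PySem.List.dedup L).map g =
        (PySem.List.dedup L).map (fun x => if decide (x ∈ (['c','A','H','G','B'] : List Char)) then g x else 0) := by
      apply List.map_eq_map_iff.mpr
      intro x _
      by_cases hm : x ∈ (['c','A','H','G','B'] : List Char)
      · simp [hm]
      · simp [hm, hzero x hm]
    have hperm : ((PySem.List.dedup L).filter (fun ch => decide (ch ∈ (['c','A','H','G','B'] : List Char)))).Perm
        ((['c','A','H','G','B'] : List Char).filter (fun ch => decide (ch ∈ L))) := by
      refine (List.perm_ext_iff_of_nodup ?_ ?_).mpr ?_
      · exact (PySem.List.nodup_dedup L).filter _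
      · exact (by decide : (['c','A','H','G','B'] : List Char).Nodup).filter _
      · intro a
        simp only [List.mem_filter, PySem.List.mem_dedup, decide_eq_true_eq]
        tauto
    rw [h1, ← sum_map_filter_eq g _ (PySem.List.dedup L), (hperm.map g).sum_eq]
  rw [hB, sum_map_filter_eq g (fun ch => decide (ch ∈ L)) (['c','A','H','G','B'] : List Char)]
  -- each of A's five products equals the corresponding guarded contribution
  have hterm : ∀ (X : Char) (sz : Int), PySem.Dict.get? sizes X = some sz →
      (if (PySem.Dict.contains d (String.ofList [X]) && PySem.Str.isIn (String.ofList [X]) modelform) then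
        ((PySem.Dict.getD d (String.ofList [X]) []).length : Int)
      else if PySem.Str.isIn (String.ofList [X]) modelform then 1 else 0) * sz =
      (if decide (X ∈ L) then g X else 0) := by
    intro X sz hX
    rw [hmem X, PySem.Dict.contains_eq_isSome_get?, PySem.Dict.getD_eq_get?_getD]
    by_cases hx : X ∈ L
    · simp only [hx, decide_true, Bool.and_true, if_true]
      rw [hg]
      unfold pvContrib
      rw [hX]
      cases hq : PySem.Dict.get? d (String.ofList [X]) with
      | some fs => simp
      | none => simp
    · simp [hx]
  have hc : PySem.Dict.get? sizes 'c' = some 1 := by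
    simp [hsz, PySem.Dict.get?_mk_cons]
  have hA : PySem.Dict.get? sizes 'A' = some r := by
    simp [hsz, PySem.Dict.get?_mk_cons]
  have hH : PySem.Dict.get? sizes 'H' = some (PySem.Int.floordiv (r * (r + 1)) 2) := by
    simp [hsz, PySem.Dict.get?_mk_cons]
  have hG : PySem.Dict.get? sizes 'G' = some (PySem.Int.floordiv (r * (r + 1) * (r + 2)) 6) := by
    simp [hsz, PySem.Dict.get?_mk_cons]
  have hBB : PySem.Dict.get? sizes 'B' = some m := by
    simp [hsz, PySem.Dict.get?_mk_cons]
  simp only [lstsq_size, ← hd, List.map_cons, List.map_nil, List.zip, List.zipWith,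
    List.sum_cons, List.sum_nil]
  have e1 := hterm 'c' 1 hc
  have e2 := hterm 'A' r hA
  have e3 := hterm 'H' _ hH
  have e4 := hterm 'G' _ hG
  have e5 := hterm 'B' m hBB
  simp only [show String.ofList ['c'] = "c" from rfl, show String.ofList ['A'] = "A" from rfl,
    show String.ofList ['H'] = "H" from rfl, show String.ofList ['G'] = "G" from rfl,
    show String.ofList ['B'] = "B" from rfl] at e1 e2 e3 e4 e5
  rw [e1, e2, e3, e4, e5]

-- ===== VERDICT (by name: the statement is the Claim_ definition above) =====
theorem lstsq_size_spec : Claim_equal_lstsq_size := by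
  intro modelform r m affines _ _
  unfold Spec_lstsq_size
  exact lstsq_size_equal modelform r m affines
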